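-- pv_equiv track=rewrite | github.com/oryet/PublicLib | Protocol/General.py | specialdata
-- ===== SOURCE A (Python) =====
-- def specialdata(exdata):
--     c = ''
--     i = 0
--     ml=[]
--     oadtimes=0
--     moerdatalist = exdata.split(',')
--     if len(moerdatalist) > 2 and len(moerdatalist) < 6:
--         ml.extend(moerdatalist)
--         oadtimes=len(ml)
--     #数据项大于5个，说明是需量和时间，它们之间的逗号要保留
--     elif len(moerdatalist) > 5:
--         for item in moerdatalist:
--             i += 1
--             c += item + ","
--             if i == 2:
--                 i = 0
--                 ml.append(c[:-1])
--                 c = ''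
--                 continue
--         oadtimes = len(ml)
--     else:
--         ml.append(exdata)
--         oadtimes = len(ml)
--     return ml,oadtimes
-- ===== SOURCE B (Python) =====
-- def specialdata(exdata):
--     moerdatalist = exdata.split(',')
--     n = len(moerdatalist)
--     if 2 < n < 6:
--         return list(moerdatalist), n
--     if n > 5:
--         # pair consecutive items by consuming one iterator twice per step
--         it = iter(moerdatalist)
--         ml = [a + ',' + b for a, b in zip(it, it)]
--         return ml, len(ml)
--     return [exdata], 1
-- ===== Notes on version B (the rewrite author's own statement) =====
-- stated objective: idiomatic
-- what changed: The counter/accumulator loop of the >5 branch is replaced by direct pairwise consumption of one iterator (zip(it, it)) joining each consecutive pair, so the running string c, the toggle counter i and the trailing-comma strip disappear; the three-way branch becomes early returns.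
import Mathlib
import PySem

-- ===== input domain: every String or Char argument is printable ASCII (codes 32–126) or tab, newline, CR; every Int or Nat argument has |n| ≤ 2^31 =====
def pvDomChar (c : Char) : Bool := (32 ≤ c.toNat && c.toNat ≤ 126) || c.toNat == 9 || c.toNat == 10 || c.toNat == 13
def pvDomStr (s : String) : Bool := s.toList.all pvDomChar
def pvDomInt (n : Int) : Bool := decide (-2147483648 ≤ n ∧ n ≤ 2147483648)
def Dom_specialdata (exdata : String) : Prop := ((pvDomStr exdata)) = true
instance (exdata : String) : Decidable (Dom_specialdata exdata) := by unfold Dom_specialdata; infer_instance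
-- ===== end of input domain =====

-- B replaces A's running-string/toggle-counter loop (and its trailing-comma strip) in the >5 branch by
-- direct pairwise consumption of the split list (zip(it, it)); objective: idiomatic, same cost.

-- ===== PORT A =====
-- A's loop body: i += 1; c += item + ','; on i == 2 reset and append c[:-1]
def specialdataStep (s : String × Int × List String) (item : String) : String × Int × List String :=
  let i := s.2.1 + 1
  let c := s.1 ++ (item ++ ",")
  if i == 2 then ("", 0, s.2.2 ++ [PySem.Str.slice c none (some (-1))])
  else (c, i, s.2.2)

def specialdata (exdata : String) : List String × Int :=
  let moerdatalist := (PySem.Str.split? exdata ",").getD []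
  if moerdatalist.length > 2 ∧ moerdatalist.length < 6 then
    let ml := ([] : List String) ++ moerdatalist
    (ml, (ml.length : Int))
  else if moerdatalist.length > 5 then
    let st := moerdatalist.foldl specialdataStep ("", 0, ([] : List String))
    (st.2.2, (st.2.2.length : Int))
  else
    ([exdata], (1 : Int))

-- ===== PORT B =====
-- Source B's zip(it, it) consumes the list two items at a time; ported as this two-at-a-time recursion (exact).
def pairJoin : List String → List String
  | a :: b :: rest => (a ++ "," ++ b) :: pairJoin rest
  | _ => []

def specialdata_alt (exdata : String) : List String × Int :=
  let l := (PySem.Str.split? exdata ",").getD []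
  let n : Nat := l.length
  if n > 2 ∧ n < 6 then
    (l, (n : Int))
  else if n > 5 then
    let ml := pairJoin l
    (ml, (ml.length : Int))
  else
    ([exdata], (1 : Int))

-- ===== PRECONDITION & SPEC =====
def Spec_specialdata (exdata : String) (out : List String × Int) : Prop := out = specialdata_alt exdata
instance (exdata : String) (out : List String × Int) : Decidable (Spec_specialdata exdata out) := by unfold Spec_specialdata; infer_instance

-- ===== CLAIM (what is proved, stated in full; the proofs are below) =====
def Claim_equal_specialdata : Prop := ∀ (exdata : String), Dom_specialdata exdata → Spec_specialdata exdata (specialdata exdata)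

-- ===== LEMMAS AND PROOFS =====

-- A's c[:-1] after two extensions: ("" ++ (a ++ ",")) ++ (b ++ ",") minus its last char is a ++ "," ++ b
theorem specialdata_strip_pair (a b : String) :
    PySem.Str.slice (("" ++ (a ++ ",")) ++ (b ++ ",")) none (some (-1)) = a ++ "," ++ b := by
  have h' : (PySem.Str.slice (("" ++ (a ++ ",")) ++ (b ++ ",")) none (some (-1))).toList
      = (a ++ "," ++ b).toList := by
    rw [PySem.Str.slice_to_neg_one]
    have hsplit : (("" ++ (a ++ ",")) ++ (b ++ ",")).toList = (a ++ "," ++ b).toList ++ [','] := by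
      simp [String.toList_append]
    rw [hsplit, List.dropLast_concat]
  apply String.ext
  simpa [String.toList] using h'

-- A's fold over the split list, started with empty c and i = 0, appends exactly the joined pairs
theorem specialdata_fold_pairs (l : List String) :
    ∀ ml : List String, (l.foldl specialdataStep ("", 0, ml)).2.2 = ml ++ pairJoin l := by
  induction l using pairJoin.induct with
  | case1 a b rest ih =>
      intro ml
      have h1 : specialdataStep ("", 0, ml) a = ("" ++ (a ++ ","), 1, ml) := by
        simp [specialdataStep]
      have h2 : specialdataStep ("" ++ (a ++ ","), 1, ml) b
          = ("", 0, ml ++ [PySem.Str.slice (("" ++ (a ++ ",")) ++ (b ++ ",")) none (some (-1))]) := by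
        simp [specialdataStep]
      simp only [List.foldl, h1, h2, ih, specialdata_strip_pair, pairJoin]
      simp
  | case2 t h =>
      intro ml
      match t, h with
      | [], _ => simp [pairJoin]
      | [a], _ => simp [pairJoin, List.foldl, specialdataStep]
      | a :: b :: r, h => exact (h a b r rfl).elim

-- ===== VERDICT (by name: the statement is the Claim_ definition above) =====
theorem specialdata_spec : Claim_equal_specialdata := by
  unfold Claim_equal_specialdata
  intro exdata _
  unfold Spec_specialdata
  simp only [specialdata, specialdata_alt]
  split_ifs with h1 h2
  · rfl
  · have h := specialdata_fold_pairs ((PySem.Str.split? exdata ",").getD []) []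
    simp only [List.nil_append] at h
    rw [h]
  · rfl
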